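-- pv_equiv track=rewrite | github.com/dzhuang/django_ikuai_behavioral_control | behavioral_control/my_router/data_manager.py | find_continuous_substrings
-- ===== SOURCE A (Python) =====
-- def find_continuous_substrings(s):
--     # Define the adjacency list for the graph, considering 7 is connected to 1
--     adjacency_list = {
--         '1': ['2', '7'],
--         '2': ['1', '3'],
--         '3': ['2', '4'],
--         '4': ['3', '5'],
--         '5': ['4', '6'],
--         '6': ['5', '7'],
--         '7': ['6', '1']
--     }
--
--     # Convert the string into a set for O(1) lookups
--     digits_set = set(s)
--
--     # Helper function to perform DFS and find connected components
--     def dfs(node, visited, component):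
--         visited.add(node)
--         component.append(node)
--         for neighbour in adjacency_list[node]:
--             if neighbour in digits_set and neighbour not in visited:
--                 dfs(neighbour, visited, component)
--
--     visited = set()
--     components = []
--
--     # Perform DFS for each digit in the string that hasn't been visited
--     for digit in s:
--         if digit not in visited:
--             component = []
--             dfs(digit, visited, component)
--             components.append(''.join(sorted(component, key=lambda x: int(x))))
--
--     # Special case handling for '7' and '1' to ensure '7' comes before '1'
--     for i, component in enumerate(components):
--         if '7' in component and '1' in component:
--             components[i] = ''.join(
--                 sorted(component, key=lambda x: ('1' if x == '7' else '0', x)))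
--
--     return components
-- ===== SOURCE B (Python) =====
-- def find_continuous_substrings(s):
--     # Sort-and-group instead of DFS: runs of consecutive digits among the
--     # distinct digits of s, with the 1-run and 7-run merged (ring wraparound),
--     # then one pass over s emitting each component at its first appearance.
--     present = sorted(int(c) for c in set(s) if '1' <= c <= '7')
--     runs = []
--     for d in present:
--         if runs and runs[-1][-1] == d - 1:
--             runs[-1].append(d)
--         else:
--             runs.append([d])
--     if len(runs) > 1 and runs[0][0] == 1 and runs[-1][-1] == 7:
--         runs = [runs[0] + runs[-1]] + runs[1:-1]
--     comp_of = {}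
--     for run in runs:
--         text = ''.join(str(d) for d in sorted(run))
--         for d in run:
--             comp_of[str(d)] = text
--     out = []
--     seen = set()
--     for c in s:
--         text = comp_of[c]
--         if text not in seen:
--             seen.add(text)
--             out.append(text)
--     return out
-- ===== Notes on version B (the rewrite author's own statement) =====
-- stated objective: alternative
-- what changed: Replaces the recursive DFS over the 7-node ring adjacency list (plus the no-op '7'/'1' re-sort pass) with sort-and-group: the distinct digits are sorted, split into runs of consecutive integers, the 1-run and 7-run merged for the ring wraparound, and one pass over s emits each precomputed component text at its first appearance.
import Mathlib
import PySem

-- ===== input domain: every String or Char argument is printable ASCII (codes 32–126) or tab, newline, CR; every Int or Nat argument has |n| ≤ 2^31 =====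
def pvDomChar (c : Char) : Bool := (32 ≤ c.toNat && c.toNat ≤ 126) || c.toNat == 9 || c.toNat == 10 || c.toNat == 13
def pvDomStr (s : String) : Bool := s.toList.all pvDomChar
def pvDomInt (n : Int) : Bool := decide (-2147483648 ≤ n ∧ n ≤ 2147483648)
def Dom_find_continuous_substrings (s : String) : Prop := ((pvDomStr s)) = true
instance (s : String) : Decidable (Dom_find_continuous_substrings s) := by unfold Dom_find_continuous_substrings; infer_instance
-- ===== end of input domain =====

-- B replaces A's recursive DFS over the 7-node ring with sort-and-group (runs of
-- consecutive digits, 1-run and 7-run merged for the wraparound) plus one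
-- first-appearance emission pass; alternative algorithm, same cost.


-- ===== PORT A =====
-- adjacency_list; chars not in '1'..'7' have no entry (Python: KeyError, excluded by Pre_)
def pvAdj (c : Char) : List Char :=
  if c = '1' then ['2','7'] else if c = '2' then ['1','3'] else if c = '3' then ['2','4']
  else if c = '4' then ['3','5'] else if c = '5' then ['4','6'] else if c = '6' then ['5','7']
  else if c = '7' then ['6','1'] else []

-- dfs(node, visited, component); fuel 8 > 7 = number of graph nodes, so never exhausted
def pvDfs (digits : PySem.Set Char) : Nat → Char → PySem.Set Char × List Char → PySem.Set Char × List Char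
  | 0, _, st => st
  | fuel+1, node, st =>
    (pvAdj node).foldl
      (fun st nb => if PySem.Set.contains digits nb && !(PySem.Set.contains st.1 nb)
                    then pvDfs digits fuel nb st else st)
      (PySem.Set.add st.1 node, st.2 ++ [node])

-- int(x) for a one-character string x (ValueError default unreached: only digit chars occur under Pre_)
def pvIntOfA (c : Char) : Int := (PySem.Int.ofChars? [c]).getD 0

-- body of A's `for digit in s` loop: ''.join of the sorted component kept as a List Char
def pvStepA (digits : PySem.Set Char) (st : PySem.Set Char × List (List Char)) (digit : Char) :
    PySem.Set Char × List (List Char) :=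
  if PySem.Set.contains st.1 digit then st
  else
    let r := pvDfs digits 8 digit (st.1, [])
    (r.1, st.2 ++ [PySem.List.sorted r.2 pvIntOfA false])

-- A's final enumerate pass: each index is overwritten once from its own entry, i.e. a map;
-- the Python key ('1' if x == '7' else '0', x) compares exactly like the pair (1/0, x)
def pvPostA (comps : List (List Char)) : List (List Char) :=
  comps.map (fun comp =>
    if PySem.Chars.isIn ['7'] comp && PySem.Chars.isIn ['1'] comp then
      PySem.List.sorted2 comp (fun x => if x = '7' then (1 : Nat) else 0) (fun x => x) false
    else comp)

def pvCoreA (l : List Char) : List (List Char) :=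
  let digits := PySem.Set.ofList l
  pvPostA (l.foldl (pvStepA digits) (PySem.Set.empty, [])).2

-- components are built as List Char throughout and turned into Strings once at return
def find_continuous_substrings (s : String) : List String :=
  (pvCoreA s.toList).map String.ofList

-- ===== PORT B =====
-- int(c) for a one-character string c (ValueError default unreached: only digit chars reach it)
def pvIntOfB (c : Char) : Int := (PySem.Int.ofChars? [c]).getD 0

-- str(d) for a single digit d, as the one character it prints
def pvChr (d : Int) : Char := Char.ofNat (48 + d.toNat)

-- Source B's runs loop (runs[-1] accessed only when runs is nonempty; getD defaults unreached)
def pvRuns (present : List Int) : List (List Int) :=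
  present.foldl (fun runs d =>
    if (runs.getLast?.getD []).getLast? = some (d - 1)
    then runs.dropLast ++ [(runs.getLast?.getD []) ++ [d]]
    else runs ++ [[d]]) []

-- Source B's comp_of dict: keys are the one-character strings str(d), modelled as Char
def pvCompOf (runs : List (List Int)) : PySem.Dict Char (List Char) :=
  runs.foldl (fun dict run =>
    let text := (PySem.List.sorted run (fun x => x) false).flatMap PySem.Int.toChars
    run.foldl (fun dict d => dict.insert (pvChr d) text) dict) PySem.Dict.empty

-- body of Source B's final `for c in s` loop (comp_of[c]: KeyError default unreached under Pre_)
def pvStepB (compOf : PySem.Dict Char (List Char)) (st : PySem.Set (List Char) × List (List Char)) (c : Char) :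
    PySem.Set (List Char) × List (List Char) :=
  let text := (compOf.get? c).getD []
  if PySem.Set.contains st.1 text then st
  else (PySem.Set.add st.1 text, st.2 ++ [text])

-- sorted(int(c) for c in set(s) if '1' <= c <= '7'): sorting distinct ints by identity,
-- so the hash order of set(s) cannot influence the result
def pvCoreB (l : List Char) : List (List Char) :=
  let present : List Int :=
    PySem.List.sorted (((PySem.Set.ofList l).filter
      (fun c => decide ('1' ≤ c) && decide (c ≤ '7'))).map pvIntOfB) (fun x => x) false
  let runs0 := pvRuns present
  let runs := if runs0.length > 1 ∧ (runs0.getD 0 []).getD 0 0 = 1 ∧ (runs0.getLast?.getD []).getLast? = some 7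
              then [(runs0.getD 0 []) ++ (runs0.getLast?.getD [])] ++ (runs0.drop 1).dropLast
              else runs0
  let compOf := pvCompOf runs
  (l.foldl (pvStepB compOf) (PySem.Set.empty, [])).2

def find_continuous_substrings_alt (s : String) : List String :=
  (pvCoreB s.toList).map String.ofList

-- ===== PRECONDITION & SPEC =====
-- Pre_ excludes exactly the strings containing a character outside '1'..'7':
-- there A raises KeyError (adjacency_list[digit]) and returns nothing.
def Pre_find_continuous_substrings (s : String) : Prop :=
  (s.toList.all (fun c => c ∈ ['1','2','3','4','5','6','7'])) = true
instance (s : String) : Decidable (Pre_find_continuous_substrings s) := by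
  unfold Pre_find_continuous_substrings; infer_instance

def pvWitness_find_continuous_substrings : String := "1271435"

def Spec_find_continuous_substrings (s : String) (out : List String) : Prop := out = find_continuous_substrings_alt s
instance (s : String) (out : List String) : Decidable (Spec_find_continuous_substrings s out) := by unfold Spec_find_continuous_substrings; infer_instance

-- ===== CLAIM (what is proved, stated in full; the proofs are below) =====
def Claim_equal_find_continuous_substrings : Prop := ∀ (s : String), Dom_find_continuous_substrings s → Pre_find_continuous_substrings s → Spec_find_continuous_substrings s (find_continuous_substrings s)

-- ===== LEMMAS AND PROOFS =====

-- both folds skip characters that were already "seen": folding over l equals folding over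
-- the first occurrences of l's new characters
def pvNew (seen : List Char) : List Char → List Char
  | [] => []
  | c :: t => if c ∈ seen then pvNew seen t else c :: pvNew (c :: seen) t

theorem pvNew_congr (s₁ s₂ : List Char) (h : ∀ x, x ∈ s₁ ↔ x ∈ s₂) (l : List Char) :
    pvNew s₁ l = pvNew s₂ l := by
  induction l generalizing s₁ s₂ with
  | nil => rfl
  | cons c t ih =>
    simp only [pvNew]
    by_cases hc : c ∈ s₁
    · rw [if_pos hc, if_pos ((h c).mp hc)]; exact ih s₁ s₂ h
    · rw [if_neg hc, if_neg (fun hx => hc ((h c).mpr hx))]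
      exact congrArg _ (ih (c :: s₁) (c :: s₂) (by intro x; simp [h x]))

theorem pvFoldlAdd (l acc : List Char) :
    List.foldl PySem.Set.add acc l = acc ++ pvNew acc l := by
  induction l generalizing acc with
  | nil => simp [pvNew]
  | cons c t ih =>
    simp only [List.foldl, pvNew, PySem.Set.add, PySem.Set.contains]
    by_cases hc : c ∈ acc
    · rw [if_pos (by simpa using hc), if_pos hc]; exact ih acc
    · rw [if_neg (by simpa using hc), if_neg hc, ih (acc ++ [c]),
        pvNew_congr (acc ++ [c]) (c :: acc) (by intro x; simp [or_comm]) t]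
      simp

theorem pvNew_nil (l : List Char) : pvNew [] l = PySem.Set.ofList l := by
  rw [PySem.Set.ofList_eq_foldl, pvFoldlAdd]; rfl

theorem pvFoldlSkip {σ : Type} (step : σ → Char → σ) (mem : σ → Char → Prop)
    (hskip : ∀ st c, mem st c → step st c = st)
    (hself : ∀ st c, mem (step st c) c)
    (hmono : ∀ st c c', mem st c' → mem (step st c) c') :
    ∀ (l : List Char) (seen : List Char) (st : σ), (∀ c ∈ seen, mem st c) →
      l.foldl step st = (pvNew seen l).foldl step st := by
  intro l
  induction l with
  | nil => intro seen st _; rfl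
  | cons c t ih =>
    intro seen st hseen
    simp only [List.foldl, pvNew]
    by_cases hc : c ∈ seen
    · rw [if_pos hc, hskip st c (hseen c hc)]
      exact ih seen st hseen
    · rw [if_neg hc]
      simp only [List.foldl]
      refine ih (c :: seen) (step st c) ?_
      intro c' hc'
      rcases List.mem_cons.mp hc' with h | h
      · rw [h]; exact hself st c
      · exact hmono st c c' (hseen c' h)

-- visited only grows through dfs, and dfs marks its start node
theorem pvDfs_mono (digits : PySem.Set Char) :
    ∀ (fuel : Nat) (node : Char) (st : PySem.Set Char × List Char) (x : Char),
      x ∈ st.1 → x ∈ (pvDfs digits fuel node st).1 := by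
  intro fuel
  induction fuel with
  | zero => intro node st x hx; exact hx
  | succ f ih =>
    intro node st x hx
    unfold pvDfs
    refine List.foldlRecOn (motive := fun (st' : PySem.Set Char × List Char) => x ∈ st'.1) (pvAdj node) _ ?_ ?_
    · exact (PySem.Set.mem_add st.1 node x).mpr (Or.inl hx)
    · intro b hb a _
      dsimp only
      split
      · exact ih a b x hb
      · exact hb

theorem pvDfs_start (digits : PySem.Set Char) (f : Nat) (node : Char)
    (st : PySem.Set Char × List Char) : node ∈ (pvDfs digits (f+1) node st).1 := by
  unfold pvDfs
  refine List.foldlRecOn (motive := fun (st' : PySem.Set Char × List Char) => node ∈ st'.1) (pvAdj node) _ ?_ ?_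
  · exact (PySem.Set.mem_add st.1 node node).mpr (Or.inr rfl)
  · intro b hb a _
    dsimp only
    split
    · exact pvDfs_mono digits f a b node hb
    · exact hb

theorem pvContains_iff {α : Type} [BEq α] [LawfulBEq α] (s : PySem.Set α) (x : α) :
    PySem.Set.contains s x = true ↔ x ∈ s := by
  simp [PySem.Set.contains]

-- the two "already seen" step properties, A side (mem st c := c ∈ visited)
theorem pvStepA_skip (digits : PySem.Set Char) (st : PySem.Set Char × List (List Char)) (c : Char)
    (h : c ∈ st.1) : pvStepA digits st c = st := by
  unfold pvStepA; rw [if_pos ((pvContains_iff st.1 c).mpr h)]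

theorem pvStepA_self (digits : PySem.Set Char) (st : PySem.Set Char × List (List Char)) (c : Char) :
    c ∈ (pvStepA digits st c).1 := by
  unfold pvStepA
  by_cases h : c ∈ st.1
  · rw [if_pos ((pvContains_iff st.1 c).mpr h)]; exact h
  · rw [if_neg (by simpa [pvContains_iff] using h)]
    exact pvDfs_start digits 7 c (st.1, [])

theorem pvStepA_mono (digits : PySem.Set Char) (st : PySem.Set Char × List (List Char)) (c c' : Char)
    (h : c' ∈ st.1) : c' ∈ (pvStepA digits st c).1 := by
  dsimp only [pvStepA]
  split
  · exact h
  · exact pvDfs_mono digits 8 c (st.1, []) c' h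

-- B side (mem st c := comp_of[c] ∈ seen)
theorem pvStepB_skip (compOf : PySem.Dict Char (List Char))
    (st : PySem.Set (List Char) × List (List Char)) (c : Char)
    (h : (compOf.get? c).getD [] ∈ st.1) : pvStepB compOf st c = st := by
  unfold pvStepB; rw [if_pos ((pvContains_iff st.1 _).mpr h)]

theorem pvStepB_self (compOf : PySem.Dict Char (List Char))
    (st : PySem.Set (List Char) × List (List Char)) (c : Char) :
    (compOf.get? c).getD [] ∈ (pvStepB compOf st c).1 := by
  unfold pvStepB
  by_cases h : (compOf.get? c).getD [] ∈ st.1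
  · rw [if_pos ((pvContains_iff st.1 _).mpr h)]; exact h
  · rw [if_neg (by simpa [pvContains_iff] using h)]
    exact (PySem.Set.mem_add st.1 _ _).mpr (Or.inr rfl)

theorem pvStepB_mono (compOf : PySem.Dict Char (List Char))
    (st : PySem.Set (List Char) × List (List Char)) (c c' : Char)
    (h : (compOf.get? c').getD [] ∈ st.1) : (compOf.get? c').getD [] ∈ (pvStepB compOf st c).1 := by
  dsimp only [pvStepB]
  split
  · exact h
  · exact (PySem.Set.mem_add st.1 _ _).mpr (Or.inl h)

-- the two cores evaluated on the deduplicated character list (first occurrences, in order)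
def pvCoreA2 (t : List Char) : List (List Char) :=
  pvPostA (t.foldl (pvStepA t) (PySem.Set.empty, [])).2

def pvCoreB2 (t : List Char) : List (List Char) :=
  let present : List Int :=
    PySem.List.sorted ((t.filter
      (fun c => decide ('1' ≤ c) && decide (c ≤ '7'))).map pvIntOfB) (fun x => x) false
  let runs0 := pvRuns present
  let runs := if runs0.length > 1 ∧ (runs0.getD 0 []).getD 0 0 = 1 ∧ (runs0.getLast?.getD []).getLast? = some 7
              then [(runs0.getD 0 []) ++ (runs0.getLast?.getD [])] ++ (runs0.drop 1).dropLast
              else runs0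
  let compOf := pvCompOf runs
  (t.foldl (pvStepB compOf) (PySem.Set.empty, [])).2

theorem pvCoreA_eq (l : List Char) : pvCoreA l = pvCoreA2 (PySem.Set.ofList l) := by
  unfold pvCoreA pvCoreA2
  dsimp only
  rw [pvFoldlSkip (pvStepA (PySem.Set.ofList l)) (fun st c => c ∈ st.1)
      (pvStepA_skip _) (pvStepA_self _) (pvStepA_mono _) l [] _ (by simp), pvNew_nil]

theorem pvCoreB_eq (l : List Char) : pvCoreB l = pvCoreB2 (PySem.Set.ofList l) := by
  unfold pvCoreB pvCoreB2
  dsimp only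
  rw [pvFoldlSkip (pvStepB _) (fun st c => ((pvCompOf _).get? c).getD [] ∈ st.1)
      (pvStepB_skip _) (pvStepB_self _) (pvStepB_mono _) l [] _ (by simp), pvNew_nil]

-- the finite heart: both cores agree on every duplicate-free sequence over '1'..'7'
set_option maxHeartbeats 40000000 in
set_option maxRecDepth 100000 in
theorem pvEnumAll : (['1','2','3','4','5','6','7'].sublists).all
    (fun u => (List.permutations' u).all (fun t => decide (pvCoreA2 t = pvCoreB2 t))) = true := by
  decide

theorem pvEnum (t : List Char) (hn : t.Nodup) (hsub : t ⊆ ['1','2','3','4','5','6','7']) :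
    pvCoreA2 t = pvCoreB2 t := by
  obtain ⟨u, hu, hsl⟩ := hn.subperm hsub
  have h1 := List.all_eq_true.mp pvEnumAll u (List.mem_sublists.mpr hsl)
  have h2 := List.all_eq_true.mp h1 t (List.mem_permutations'.mpr hu.symm)
  exact of_decide_eq_true h2

-- ===== VERDICT (by name: the statement is the Claim_ definition above) =====
theorem find_continuous_substrings_spec : Claim_equal_find_continuous_substrings := by
  intro s _ hpre
  unfold Spec_find_continuous_substrings find_continuous_substrings find_continuous_substrings_alt
  rw [pvCoreA_eq, pvCoreB_eq, pvEnum (PySem.Set.ofList s.toList) (PySem.Set.nodup_ofList _)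
    (fun c hc => of_decide_eq_true
      (List.all_eq_true.mp hpre c ((PySem.Set.mem_ofList _ _).mp hc)))]
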